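-- pv_equiv track=rewrite | github.com/whyj107/Algorithm | CodeWar/20201023_Who is the killer.py | killer
-- ===== SOURCE A (Python) =====
-- def killer(suspect_info, dead):
--     for k in suspect_info.keys():
--         cnt = 0
--         for d in dead:
--             if d in suspect_info[k]:
--                 cnt += 1
--         if cnt == len(dead):
--             return k
-- ===== SOURCE B (Python) =====
-- def killer(suspect_info, dead):
--     candidates = set(suspect_info.keys())
--     for d in dead:
--         candidates = {k for k in candidates if d in suspect_info[k]}
--     for k in suspect_info.keys():
--         if k in candidates:
--             return k
--     return None
-- ===== Notes on version B (the rewrite author's own statement) =====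
-- stated objective: faster
-- what changed: Inverts the loop nest: instead of counting every dead person per suspect, B keeps a shrinking candidate set intersected once per dead person, then returns the first surviving key in dict order.
import Mathlib
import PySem

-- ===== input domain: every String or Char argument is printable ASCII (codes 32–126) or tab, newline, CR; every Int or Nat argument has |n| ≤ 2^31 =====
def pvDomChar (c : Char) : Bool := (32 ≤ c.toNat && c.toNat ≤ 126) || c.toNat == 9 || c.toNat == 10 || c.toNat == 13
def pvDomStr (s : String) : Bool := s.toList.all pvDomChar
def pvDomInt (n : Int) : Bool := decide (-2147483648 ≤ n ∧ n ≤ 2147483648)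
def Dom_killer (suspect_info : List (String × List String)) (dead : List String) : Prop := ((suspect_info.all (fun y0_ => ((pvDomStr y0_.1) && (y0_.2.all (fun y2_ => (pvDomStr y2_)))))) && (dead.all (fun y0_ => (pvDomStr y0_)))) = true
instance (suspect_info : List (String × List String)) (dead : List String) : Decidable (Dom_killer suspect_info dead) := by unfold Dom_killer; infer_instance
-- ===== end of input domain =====

-- B maintains a shrinking candidate set, looping over the dead in the outer position,
-- instead of A's per-suspect counting loop; return value equivalence only.

-- ===== PORT A =====
-- 'for k in suspect_info.keys(): … return k' as recursion over the keys list
def killerLoopA (d : PySem.Dict String (List String)) (dead : List String) :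
    List String → Option String
  | [] => none
  | k :: ks =>
    let cnt : Int := dead.foldl (fun c dd => if dd ∈ d.getD k [] then c + 1 else c) 0
    if cnt = (dead.length : Int) then some k else killerLoopA d dead ks

def killer (suspect_info : List (String × List String)) (dead : List String) : Option String :=
  let d := PySem.Dict.ofList suspect_info
  killerLoopA d dead d.keys

-- ===== PORT B =====
def killer_alt (suspect_info : List (String × List String)) (dead : List String) : Option String :=
  let d := PySem.Dict.ofList suspect_info
  let candidates : PySem.Set String :=
    dead.foldl (fun c dd => c.filter (fun k => decide (dd ∈ d.getD k []))) (PySem.Set.ofList d.keys)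
  d.keys.find? (fun k => PySem.Set.contains candidates k)

-- ===== PRECONDITION & SPEC =====
def Spec_killer (suspect_info : List (String × List String)) (dead : List String) (out : Option String) : Prop := out = killer_alt suspect_info dead
instance (suspect_info : List (String × List String)) (dead : List String) (out : Option String) : Decidable (Spec_killer suspect_info dead out) := by unfold Spec_killer; infer_instance

-- ===== CLAIM (what is proved, stated in full; the proofs are below) =====
def Claim_equal_killer : Prop := ∀ (suspect_info : List (String × List String)) (dead : List String), Dom_killer suspect_info dead → Spec_killer suspect_info dead (killer suspect_info dead)

-- ===== LEMMAS AND PROOFS =====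

-- A's counting loop computes countP
theorem cntFold (L dead : List String) (c : Int) :
    dead.foldl (fun c dd => if dd ∈ L then c + 1 else c) c
      = c + (dead.countP (fun dd => decide (dd ∈ L)) : Int) := by
  induction dead generalizing c with
  | nil => simp
  | cons dd rest ih =>
    simp only [List.foldl_cons, List.countP_cons, ih]
    by_cases h : dd ∈ L
    · simp [h]; push_cast; ring
    · simp [h]

-- membership in B's folded filter
theorem candMem (d : PySem.Dict String (List String)) (dead : List String)
    (c : List String) (k : String) :
    k ∈ dead.foldl (fun c dd => c.filter (fun x => decide (dd ∈ d.getD x []))) c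
      ↔ k ∈ c ∧ ∀ dd ∈ dead, dd ∈ d.getD k [] := by
  induction dead generalizing c with
  | nil => simp
  | cons dd rest ih =>
    simp only [List.foldl_cons, ih, List.mem_filter, decide_eq_true_eq, List.mem_cons]
    constructor
    · rintro ⟨⟨hk, hd⟩, hall⟩
      refine ⟨hk, fun x hx => ?_⟩
      rcases hx with rfl | hx
      · exact hd
      · exact hall x hx
    · rintro ⟨hk, hall⟩
      exact ⟨⟨hk, hall dd (Or.inl rfl)⟩, fun x hx => hall x (Or.inr hx)⟩

theorem loopA_eq_find (d : PySem.Dict String (List String)) (dead : List String)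
    (ks : List String) (hsub : ∀ k ∈ ks, k ∈ d.keys) :
    killerLoopA d dead ks
      = ks.find? (fun k => PySem.Set.contains
          (dead.foldl (fun c dd => c.filter (fun x => decide (dd ∈ d.getD x [])))
            (PySem.Set.ofList d.keys)) k) := by
  induction ks with
  | nil => rfl
  | cons k rest ih =>
    have hk : k ∈ d.keys := hsub k (by simp)
    have hcond :
        ((dead.foldl (fun c dd => if dd ∈ d.getD k [] then c + 1 else c) 0 : Int)
            = (dead.length : Int))
          ↔ (PySem.Set.contains
              (dead.foldl (fun c dd => c.filter (fun x => decide (dd ∈ d.getD x [])))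
                (PySem.Set.ofList d.keys)) k = true) := by
      rw [cntFold, PySem.Set.contains_iff, candMem]
      have : (dead.countP (fun dd => decide (dd ∈ d.getD k [])) : Int) = (dead.length : Int)
          ↔ dead.countP (fun dd => decide (dd ∈ d.getD k [])) = dead.length := by
        exact_mod_cast Iff.rfl
      rw [zero_add, this, List.countP_eq_length]
      simp [PySem.Set.mem_ofList, hk]
    rw [killerLoopA]
    by_cases hc : (dead.foldl (fun c dd => if dd ∈ d.getD k [] then c + 1 else c) 0 : Int)
        = (dead.length : Int)
    · rw [if_pos hc, List.find?_cons_of_pos (hcond.mp hc)]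
    · have hb : ¬ (PySem.Set.contains
          (dead.foldl (fun c dd => c.filter (fun x => decide (dd ∈ d.getD x [])))
            (PySem.Set.ofList d.keys)) k = true) := fun hcontains => hc (hcond.mpr hcontains)
      rw [if_neg hc, List.find?_cons_of_neg (by simpa using hb)]
      exact ih (fun x hx => hsub x (List.mem_cons_of_mem _ hx))

-- ===== VERDICT (by name: the statement is the Claim_ definition above) =====
theorem killer_spec : Claim_equal_killer := by
  intro suspect_info dead _
  unfold Spec_killer killer killer_alt
  exact loopA_eq_find _ _ _ (fun _ h => h)
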